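-- pv_equiv track=rewrite | github.com/BryanColeman/Projects | DES/HW4.py | split_string_and_make_binary
-- ===== SOURCE A (Python) =====
-- def split_string_and_make_binary(plain_text):
--     '''
--     split the text into lengths of 8
--     if the last string is not of length 8 note that
--     then format using 08b, which makes give it the format 00000000 for 0
--     then if we had a length of less then 8 for the last string buff with zeros
--
--     :params:
--             plain_text: string that we are breaking up
--
--     return:
--             binary_list:list of 64 bit binary numbers
--     '''
--     splits = len(plain_text) // 8
--     extra = len(plain_text) % 8
--     split_list = [plain_text[i*8:(i+1)*8] for i in range(splits)]
--     if extra > 0: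
--         split_list.append(plain_text[splits*8:])
--     binary_list = [(''.join(format(ord(c), '08b') for c in i)) for i in split_list]
--     if extra > 0:
--         temp = ''
--         for _ in range(8 - extra):
--             temp = temp + '00000000'
--         temp = temp + binary_list[-1]
--         binary_list[-1] = temp
--     return binary_list
-- ===== SOURCE B (Python) =====
-- def split_string_and_make_binary(plain_text):
--     full = ''.join(format(ord(c), '08b') for c in plain_text)
--     result = [full[i:i + 64] for i in range(0, len(full), 64)]
--     if result and len(result[-1]) < 64:
--         result[-1] = result[-1].rjust(64, '0')
--     return result
-- ===== Notes on version B (the rewrite author's own statement) =====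
-- stated objective: simpler
-- what changed: Instead of splitting the text into 8-character chunks and prepending zero bytes to the last chunk with an explicit loop, B builds the whole bit string in a single join, slices it into 64-bit groups, and right-justifies the final short group with zeros.
import Mathlib
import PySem

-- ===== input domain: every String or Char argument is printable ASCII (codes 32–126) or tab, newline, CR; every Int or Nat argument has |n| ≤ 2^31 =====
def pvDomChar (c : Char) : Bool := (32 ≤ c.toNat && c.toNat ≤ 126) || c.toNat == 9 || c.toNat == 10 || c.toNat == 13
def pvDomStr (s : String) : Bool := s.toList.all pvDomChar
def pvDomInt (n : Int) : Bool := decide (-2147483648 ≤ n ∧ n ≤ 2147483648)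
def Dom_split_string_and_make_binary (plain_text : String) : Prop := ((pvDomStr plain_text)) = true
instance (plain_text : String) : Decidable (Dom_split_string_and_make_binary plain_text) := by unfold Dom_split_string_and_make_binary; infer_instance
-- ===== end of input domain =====

-- B builds the whole bit string in one join and slices it into 64-bit groups (rjust on the
-- final short group), instead of A's 8-char chunking with a byte-padding loop; objective: simpler.

-- ===== PORT A =====
-- format(ord(c), '08b'): binary digits of the code point, left-padded with '0' to width 8 (exact: ord(c) ≥ 0)
def pvFmt08 (c : Char) : List Char := PySem.Chars.zfill (PySem.Int.toBinChars (c.toNat : Int)) 8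

def split_string_and_make_binary (plain_text : String) : List String :=
  let cs := plain_text.toList
  let splits : Int := PySem.Int.floordiv (cs.length : Int) 8
  let extra : Int := PySem.Int.mod (cs.length : Int) 8
  let split_list := (PySem.List.pyRange 0 splits 1).map
      (fun i => PySem.List.slice cs (some (i * 8)) (some ((i + 1) * 8)))
  let split_list := if extra > 0 then split_list ++ [PySem.List.slice cs (some (splits * 8)) none]
                    else split_list
  let binary_list := split_list.map (fun chunk => chunk.foldl (fun acc c => acc ++ pvFmt08 c) [])
  let binary_list :=
    if extra > 0 then
      let temp := (PySem.List.pyRange 0 (8 - extra) 1).foldl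
          (fun t _ => t ++ ['0','0','0','0','0','0','0','0']) ([] : List Char)
      let temp := temp ++ PySem.List.pyGetD binary_list (-1) []
      binary_list.dropLast ++ [temp]
    else binary_list
  binary_list.map (fun l => String.ofList l)

-- ===== PORT B =====
def split_string_and_make_binary_alt (plain_text : String) : List String :=
  let full := plain_text.toList.flatMap pvFmt08
  let result := (PySem.List.pyRange 0 (full.length : Int) 64).map
      (fun i => PySem.List.slice full (some i) (some (i + 64)))
  let result :=
    if result ≠ [] ∧ (PySem.List.pyGetD result (-1) []).length < 64 then
      -- result[-1] = result[-1].rjust(64, '0')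
      result.dropLast ++ [List.replicate (64 - (PySem.List.pyGetD result (-1) []).length) '0'
        ++ PySem.List.pyGetD result (-1) []]
    else result
  result.map (fun l => String.ofList l)

-- ===== PRECONDITION & SPEC =====
def Spec_split_string_and_make_binary (plain_text : String) (out : List String) : Prop := out = split_string_and_make_binary_alt plain_text
instance (plain_text : String) (out : List String) : Decidable (Spec_split_string_and_make_binary plain_text out) := by unfold Spec_split_string_and_make_binary; infer_instance

-- ===== CLAIM (what is proved, stated in full; the proofs are below) =====
def Claim_equal_split_string_and_make_binary : Prop := ∀ (plain_text : String), Dom_split_string_and_make_binary plain_text → Spec_split_string_and_make_binary plain_text (split_string_and_make_binary plain_text)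

-- ===== LEMMAS AND PROOFS =====

-- splitting a list into consecutive chunks of k (last chunk possibly short)
def pvChunks (k : Nat) (l : List Char) : List (List Char) :=
  if h : l = [] ∨ k = 0 then [] else l.take k :: pvChunks k (l.drop k)
termination_by l.length
decreasing_by
  simp only [not_or] at h
  have : l.length ≠ 0 := by simpa [List.length_eq_zero_iff] using h.1
  simp [List.length_drop]; omega

lemma pvChunks_nil (k : Nat) : pvChunks k [] = [] := by
  rw [pvChunks]; simp

lemma pvChunks_cons {k : Nat} (hk : 0 < k) {l : List Char} (hl : l ≠ []) :
    pvChunks k l = l.take k :: pvChunks k (l.drop k) := by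
  rw [pvChunks]; simp [hl, Nat.pos_iff_ne_zero.mp hk]

-- the range-comprehension form of chunking
lemma pvRange_chunks (k : Nat) (hk : 0 < k) (l : List Char) :
    ((List.range (l.length / k)).map (fun i => (l.drop (i * k)).take k))
      ++ (if l.length % k ≠ 0 then [l.drop (l.length / k * k)] else [])
    = pvChunks k l := by
  generalize hn : l.length = n
  induction n using Nat.strong_induction_on generalizing l with
  | _ n ih =>
    by_cases h0 : l = []
    · subst h0; simp at hn; subst hn; simp [pvChunks_nil, Nat.zero_div]
    · rw [pvChunks_cons hk h0]
      by_cases hlt : n < k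
      · have hdiv : n / k = 0 := Nat.div_eq_of_lt hlt
        have hmod : n % k = n := Nat.mod_eq_of_lt hlt
        have hne : n ≠ 0 := by
          intro h; exact h0 (List.length_eq_zero_iff.mp (hn.trans h))
        have hdrop : l.drop k = [] := by
          apply List.drop_eq_nil_of_le; omega
        have htake : l.take k = l := List.take_of_length_le (by omega)
        simp [hn, hdiv, hmod, hne, hdrop, htake, pvChunks_nil]
      · -- n ≥ k
        push_neg at hlt
        have hrec := ih (n - k) (by omega) (l.drop k) (by simp [hn])
        have hdivs : n / k = (n - k) / k + 1 := Nat.div_eq_sub_div hk hlt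
        have hmods : n % k = (n - k) % k := Nat.mod_eq_sub_mod hlt
        rw [← hrec, hdivs, hmods, List.range_succ_eq_map, List.map_cons, List.cons_append]
        congr 1
        · simp
        congr 1
        · rw [List.map_map]
          apply List.map_congr_left
          intro i _
          simp only [Function.comp_apply, Nat.succ_eq_add_one, List.drop_drop]
          congr 2
          ring
        · have harith : ((n - k) / k + 1) * k = (n - k) / k * k + k := by ring
          rw [harith]
          have : List.drop ((n - k) / k * k + k) l = List.drop ((n - k) / k * k) (List.drop k l) := by
            rw [List.drop_drop]; congr 1; omega
          simp [this]

-- flatMap over a constant-length-8 fmt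
set_option maxRecDepth 8192 in
lemma pvToBin_le_8 : ∀ m : Nat, m < 256 → (PySem.Int.toBinChars (m : Int)).length ≤ 8 := by decide

lemma pvFmt08_len {c : Char} (h : c.toNat < 256) : (pvFmt08 c).length = 8 := by
  rw [pvFmt08, PySem.Chars.length_zfill]
  have := pvToBin_le_8 c.toNat h
  omega

lemma pvFlatMap_len {l : List Char} (h : ∀ c ∈ l, c.toNat < 256) :
    (l.flatMap pvFmt08).length = 8 * l.length := by
  induction l with
  | nil => simp
  | cons c l ih =>
    simp only [List.flatMap_cons, List.length_append, List.length_cons]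
    rw [pvFmt08_len (h c (by simp)), ih (fun d hd => h d (by simp [hd]))]
    ring

-- chunking the flat bit string by 64 = chunking the text by 8, then flattening
lemma pvChunks_flatMap {l : List Char} (h : ∀ c ∈ l, c.toNat < 256) :
    pvChunks 64 (l.flatMap pvFmt08) = (pvChunks 8 l).map (fun ch => ch.flatMap pvFmt08) := by
  generalize hn : l.length = n
  induction n using Nat.strong_induction_on generalizing l with
  | _ n ih =>
    by_cases h0 : l = []
    · subst h0; simp [pvChunks_nil]
    · have hfl : l.flatMap pvFmt08 ≠ [] := by
        intro hempty
        have := pvFlatMap_len h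
        rw [hempty] at this
        have hne : l.length ≠ 0 := by simpa [List.length_eq_zero_iff] using h0
        rw [List.length_nil] at this; omega
      rw [pvChunks_cons (by norm_num) hfl, pvChunks_cons (by norm_num) h0, List.map_cons]
      have hsplit : l.flatMap pvFmt08 = (l.take 8).flatMap pvFmt08 ++ (l.drop 8).flatMap pvFmt08 := by
        rw [← List.flatMap_append, List.take_append_drop]
      have hlen : ((l.take 8).flatMap pvFmt08).length = 8 * (l.take 8).length :=
        pvFlatMap_len (fun c hc => h c (List.mem_of_mem_take hc))
      by_cases hge : 8 ≤ l.length
      · have h64 : ((l.take 8).flatMap pvFmt08).length = 64 := by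
          rw [hlen, List.length_take]; omega
        have htake : (l.flatMap pvFmt08).take 64 = (l.take 8).flatMap pvFmt08 := by
          rw [hsplit, List.take_append_of_le_length (by omega), List.take_of_length_le (by omega)]
        have hdrop : (l.flatMap pvFmt08).drop 64 = (l.drop 8).flatMap pvFmt08 := by
          rw [hsplit, List.drop_append_of_le_length (by omega), List.drop_eq_nil_of_le (by omega), List.nil_append]
        rw [htake, hdrop]
        congr 1
        exact ih ((l.drop 8).length) (by simp; omega)
          (fun c hc => h c (List.mem_of_mem_drop hc)) rfl
      · have hdrop8 : l.drop 8 = [] := List.drop_eq_nil_of_le (by omega)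
        have htake8 : l.take 8 = l := List.take_of_length_le (by omega)
        have hlenall : (l.flatMap pvFmt08).length = 8 * l.length := pvFlatMap_len h
        have htake : (l.flatMap pvFmt08).take 64 = l.flatMap pvFmt08 :=
          List.take_of_length_le (by omega)
        have hdrop : (l.flatMap pvFmt08).drop 64 = [] := List.drop_eq_nil_of_le (by omega)
        rw [htake, hdrop, hdrop8, htake8, pvChunks_nil, pvChunks_nil]
        simp

-- xs[-1] with a default, as a getLastD
lemma pvGetD_neg_one {α : Type} (xs : List α) (d : α) : PySem.List.pyGetD xs (-1) d = xs.getLastD d := by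
  simp only [PySem.List.pyGetD, PySem.List.pyGet?, PySem.List.pyIdx?]
  rcases xs.eq_nil_or_concat with rfl | ⟨ys, a, rfl⟩
  · simp
  · simp

-- flatMap of a constant eight-zero block is a replicate
lemma pvFlat_const {α : Type} (lst : List α) :
    lst.flatMap (fun _ => (['0','0','0','0','0','0','0','0'] : List Char))
      = List.replicate (8 * lst.length) '0' := by
  induction lst with
  | nil => simp
  | cons x lst ih =>
    simp only [List.flatMap_cons, ih, List.length_cons]
    rw [show 8 * (lst.length + 1) = 8 + 8 * lst.length by ring, List.replicate_add]
    rfl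

-- B's slicing comprehension is exactly chunking by 64
lemma pvB_prepad (full : List Char) :
    (PySem.List.pyRange 0 (full.length : Int) 64).map
      (fun i => PySem.List.slice full (some i) (some (i + 64)))
    = pvChunks 64 full := by
  rw [PySem.List.pyRange_of_pos 0 (full.length : Int) (by norm_num), List.map_map]
  have hm : (if (0:Int) < (full.length : Int) then (((full.length : Int) - 0 + 64 - 1)/64).toNat else 0)
      = full.length/64 + (if full.length % 64 ≠ 0 then 1 else 0) := by
    split_ifs <;> omega
  rw [hm]
  have hfun : ∀ k ∈ List.range (full.length/64 + (if full.length % 64 ≠ 0 then 1 else 0)),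
      ((fun i => PySem.List.slice full (some i) (some (i + 64))) ∘ (fun k : Nat => (0:Int) + 64*(k:Int))) k
      = (full.drop (k*64)).take 64 := by
    intro k _
    have h1 : ((0:Int) + 64*(k:Int)) = ((k*64 : Nat) : Int) := by push_cast; ring
    simp only [Function.comp_apply, h1]
    have h2 : ((k*64 : Nat) : Int) + 64 = ((k*64 : Nat) : Int) + ((64:Nat) : Int) := by norm_num
    rw [h2, PySem.List.slice_natCast_add]
  rw [List.map_congr_left hfun]
  have hchunks := pvRange_chunks 64 (by norm_num) full
  by_cases hmod : full.length % 64 = 0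
  · rw [if_neg (by omega), List.append_nil] at hchunks
    rw [if_neg (by omega), Nat.add_zero]
    exact hchunks
  · rw [if_pos hmod] at hchunks
    rw [if_pos (by omega), List.range_succ, List.map_append, List.map_singleton]
    rw [← hchunks]
    congr 1
    rw [List.take_of_length_le (by rw [List.length_drop]; omega)]

-- ''.join(format(...) for c in chunk) as a flatMap
lemma pvBin_eq (ch : List Char) :
    ch.foldl (fun acc c => acc ++ pvFmt08 c) [] = ch.flatMap pvFmt08 := by
  simpa using PySem.List.foldl_append_eq_flatMap pvFmt08 ch []

-- the common normal form of both ports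
def pvNorm (s : String) : List String :=
  let core := (pvChunks 8 s.toList).map (fun ch => ch.flatMap pvFmt08)
  if s.toList.length % 8 ≠ 0 then
    (core.dropLast ++
      [List.replicate (8 * (8 - s.toList.length % 8)) '0' ++ core.getLastD []]).map String.ofList
  else core.map String.ofList

lemma pvA_norm (s : String) : split_string_and_make_binary s = pvNorm s := by
  rw [split_string_and_make_binary, pvNorm]
  have h8 : PySem.Int.floordiv (s.toList.length : Int) 8 = ((s.toList.length / 8 : Nat) : Int) := by
    rw [show (8:Int) = ((8:Nat):Int) by norm_num]
    exact PySem.Int.floordiv_natCast s.toList.length 8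
  have hmod8 : PySem.Int.mod (s.toList.length : Int) 8 = ((s.toList.length % 8 : Nat) : Int) := by
    rw [show (8:Int) = ((8:Nat):Int) by norm_num]
    exact PySem.Int.mod_natCast s.toList.length 8
  have hsl : (PySem.List.pyRange 0 ((s.toList.length / 8 : Nat) : Int) 1).map
      (fun i => PySem.List.slice s.toList (some (i * 8)) (some ((i + 1) * 8)))
      = (List.range (s.toList.length / 8)).map (fun i => (s.toList.drop (i * 8)).take 8) := by
    rw [PySem.List.pyRange_zero_nat, List.map_map]
    apply List.map_congr_left
    intro k _
    simp only [Function.comp_apply]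
    have h1 : ((k:Nat):Int) * 8 = ((k*8 : Nat) : Int) := by push_cast; ring
    have h2 : (((k:Nat):Int) + 1) * 8 = ((k*8 : Nat) : Int) + ((8:Nat):Int) := by push_cast; ring
    rw [h1, h2, PySem.List.slice_natCast_add]
  have hchunks := pvRange_chunks 8 (by norm_num) s.toList
  by_cases hm : s.toList.length % 8 = 0
  · rw [if_neg (by omega), List.append_nil] at hchunks
    simp only [h8, hmod8, hsl, hm, Nat.cast_zero, gt_iff_lt, lt_irrefl, if_false,
      if_neg (show ¬ ((0:Nat) ≠ 0) by omega)]
    rw [← hchunks]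
    congr 1
    exact List.map_congr_left (fun ch _ => pvBin_eq ch)
  · rw [if_pos hm] at hchunks
    have hpos : ((s.toList.length % 8 : Nat) : Int) > 0 := by
      have : s.toList.length % 8 ≠ 0 := hm
      omega
    simp only [h8, hmod8, hsl, if_pos hpos, if_pos hm]
    have htail : PySem.List.slice s.toList (some (((s.toList.length / 8 : Nat) : Int) * 8)) none
        = s.toList.drop (s.toList.length / 8 * 8) := by
      rw [show (((s.toList.length / 8 : Nat) : Int) * 8) = ((s.toList.length / 8 * 8 : Nat) : Int) by push_cast; ring,
        PySem.List.slice_from _ (by positivity)]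
      congr 1
    rw [htail]
    have htemp : (PySem.List.pyRange 0 (8 - ((s.toList.length % 8 : Nat) : Int)) 1).foldl
        (fun t _ => t ++ ['0','0','0','0','0','0','0','0']) ([] : List Char)
        = List.replicate (8 * (8 - s.toList.length % 8)) '0' := by
      rw [show (8 - ((s.toList.length % 8 : Nat) : Int)) = ((8 - s.toList.length % 8 : Nat) : Int) by omega,
        PySem.List.pyRange_zero_nat]
      rw [show (fun (t : List Char) (_ : Int) => t ++ ['0','0','0','0','0','0','0','0'])
            = (fun (t : List Char) (x : Int) => t ++ (fun _ => ['0','0','0','0','0','0','0','0']) x) from rfl,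
        PySem.List.foldl_append_eq_flatMap, pvFlat_const]
      simp
    rw [htemp]
    have hcore : ((List.range (s.toList.length / 8)).map (fun i => (s.toList.drop (i * 8)).take 8)
          ++ [s.toList.drop (s.toList.length / 8 * 8)]).map
          (fun chunk => chunk.foldl (fun acc c => acc ++ pvFmt08 c) [])
        = (pvChunks 8 s.toList).map (fun ch => ch.flatMap pvFmt08) := by
      rw [← hchunks]
      exact List.map_congr_left (fun ch _ => pvBin_eq ch)
    rw [hcore, pvGetD_neg_one]

lemma pvB_norm (s : String) (h : ∀ c ∈ s.toList, c.toNat < 256) :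
    split_string_and_make_binary_alt s = pvNorm s := by
  rw [split_string_and_make_binary_alt, pvNorm]
  rw [pvB_prepad (s.toList.flatMap pvFmt08), pvChunks_flatMap h]
  have hchunks := pvRange_chunks 8 (by norm_num) s.toList
  by_cases hm : s.toList.length % 8 = 0
  · rw [if_neg (by omega), List.append_nil] at hchunks
    rw [if_neg (show ¬ (s.toList.length % 8 ≠ 0) by omega)]
    by_cases h0 : s.toList.length = 0
    · have hnil : s.toList = [] := List.length_eq_zero_iff.mp h0
      rw [hnil, pvChunks_nil]
      simp
    · have hrange : List.range (s.toList.length / 8)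
          = List.range (s.toList.length / 8 - 1) ++ [s.toList.length / 8 - 1] := by
        rw [← List.range_succ]; congr 1; omega
      rw [← hchunks, hrange, List.map_append, List.map_append, List.map_singleton, List.map_singleton]
      rw [if_neg]
      intro hcond
      obtain ⟨_, hlt⟩ := hcond
      rw [pvGetD_neg_one, List.getLastD_concat] at hlt
      have hlen : ((s.toList.drop ((s.toList.length / 8 - 1) * 8)).take 8).length = 8 := by
        rw [List.length_take, List.length_drop]; omega
      rw [pvFlatMap_len (fun c hc => h c (List.mem_of_mem_drop (List.mem_of_mem_take hc))), hlen] at hlt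
      omega
  · rw [if_pos hm] at hchunks
    rw [if_pos hm, ← hchunks, List.map_append, List.map_singleton]
    have hlast : ((s.toList.drop (s.toList.length / 8 * 8)).flatMap pvFmt08).length
        = 8 * (s.toList.length % 8) := by
      rw [pvFlatMap_len (fun c hc => h c (List.mem_of_mem_drop hc)), List.length_drop]
      congr 1
      omega
    rw [if_pos]
    · rw [pvGetD_neg_one, List.getLastD_concat, List.dropLast_concat, hlast,
        show 64 - 8 * (s.toList.length % 8) = 8 * (8 - s.toList.length % 8) from by omega]
    · exact ⟨by simp, by rw [pvGetD_neg_one, List.getLastD_concat, hlast]; omega⟩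

-- ===== VERDICT (by name: the statement is the Claim_ definition above) =====
theorem split_string_and_make_binary_spec : Claim_equal_split_string_and_make_binary := by
  intro s hdom
  unfold Spec_split_string_and_make_binary
  have hchars : ∀ c ∈ s.toList, c.toNat < 256 := by
    intro c hc
    have hd : pvDomChar c = true := by
      have hds : pvDomStr s = true := hdom
      rw [pvDomStr, List.all_eq_true] at hds
      exact hds c hc
    rw [pvDomChar] at hd
    simp only [Bool.or_eq_true, Bool.and_eq_true, decide_eq_true_eq, beq_iff_eq] at hd
    omega
  rw [pvA_norm, pvB_norm s hchars]
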